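-- pv_equiv track=rewrite | github.com/axelblatt/codewars | halving_sum.py | halving_sum
-- ===== SOURCE A (Python) =====
-- def halving_sum(n):
--
--     i = 2;
--     s = n;
--
--     while n != 1:
--         n = n // 2;
--         s += n;
--         i += 2;
--
--     return s;
-- ===== SOURCE B (Python) =====
-- def halving_sum(n):
--     # Closed form: n + n//2 + n//4 + ... + 1 == 2*n - popcount(n)  (for n >= 1)
--     return 2 * n - bin(n).count('1')
-- ===== Notes on version B (the rewrite author's own statement) =====
-- stated objective: simpler
-- what changed: Replaced the halving while-loop with the closed form 2*n - popcount(n), a single expression with no iteration.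
-- outside the precondition, e.g. on halving_sum(0): A does not finish within the time limit, B returns 0
import Mathlib
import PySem

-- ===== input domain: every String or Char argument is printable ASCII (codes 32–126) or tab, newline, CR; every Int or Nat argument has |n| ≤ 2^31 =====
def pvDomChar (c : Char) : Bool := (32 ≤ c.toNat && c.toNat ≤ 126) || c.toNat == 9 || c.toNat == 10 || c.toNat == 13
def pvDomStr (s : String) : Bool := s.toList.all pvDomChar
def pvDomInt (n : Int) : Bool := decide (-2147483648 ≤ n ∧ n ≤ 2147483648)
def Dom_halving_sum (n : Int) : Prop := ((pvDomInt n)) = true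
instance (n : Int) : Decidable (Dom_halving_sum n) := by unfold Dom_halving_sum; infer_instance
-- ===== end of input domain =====

-- B replaces A's halving while-loop with the closed form 2*n - popcount(n); equal for all n ≥ 1 (A loops forever for n ≤ 0, excluded by Pre_).


-- ===== PORT A =====
-- A's while-loop: while n != 1: n //= 2; s += n.  (The variable i is dead and dropped.)
-- For n ≤ 0 the Python loop never terminates (outside Pre_); the guard 1 < n makes the
-- recursion total and agrees with 'n != 1' on every n ≥ 1.
def halvingLoop (n s : Int) : Int :=
  if _h : 1 < n then
    halvingLoop (PySem.Int.floordiv n 2) (s + PySem.Int.floordiv n 2)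
  else s
termination_by n.toNat
decreasing_by
  have h2 : PySem.Int.floordiv n 2 = n / 2 := PySem.Int.floordiv_eq_ediv_of_pos (by omega)
  rw [h2]; omega

def halving_sum (n : Int) : Int := halvingLoop n n

-- ===== PORT B =====
-- Source B: return 2 * n - bin(n).count('1')   (bin(n).count('1') = popcount = PySem.Int.bitCount)
def halving_sum_alt (n : Int) : Int := 2 * n - (PySem.Int.bitCount n : Int)

-- ===== PRECONDITION & SPEC =====
-- Pre_ excludes n ≤ 0, on which the Python A never terminates (infinite while-loop).
def Pre_halving_sum (n : Int) : Prop := 1 ≤ n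
instance (n : Int) : Decidable (Pre_halving_sum n) := by unfold Pre_halving_sum; infer_instance
def pvWitness_halving_sum : Int := (5)

def Spec_halving_sum (n : Int) (out : Int) : Prop := out = halving_sum_alt n
instance (n : Int) (out : Int) : Decidable (Spec_halving_sum n out) := by unfold Spec_halving_sum; infer_instance

-- ===== CLAIM (what is proved, stated in full; the proofs are below) =====
def Claim_equal_halving_sum : Prop := ∀ (n : Int), Dom_halving_sum n → Pre_halving_sum n → Spec_halving_sum n (halving_sum n)

-- ===== LEMMAS AND PROOFS =====

-- Loop invariant: starting at n ≥ 1 with accumulator s, the loop returns s + n - bitCount n,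
-- i.e. the remaining terms n//2 + n//4 + … sum to n - popcount n.
theorem halvingLoop_closed (n s : Int) : 1 ≤ n → halvingLoop n s = s + n - (PySem.Int.bitCount n : Int) := by
  induction n, s using halvingLoop.induct with
  | case1 n s h ih =>
    intro _
    have hfd : PySem.Int.floordiv n 2 = n / 2 := PySem.Int.floordiv_eq_ediv_of_pos (by omega)
    have hbc := PySem.Int.bitCount_of_pos (n := n) (by omega)
    have hmod : PySem.Int.mod n 2 = n % 2 := PySem.Int.mod_eq_emod_of_pos (by omega)
    rw [halvingLoop, dif_pos h, ih (by rw [hfd]; omega)]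
    rw [hbc, hfd, hmod]
    have hmn : ((n % 2).toNat : Int) = n % 2 := Int.toNat_of_nonneg (Int.emod_nonneg n (by norm_num))
    push_cast
    omega
  | case2 n s h =>
    intro hn
    have h1 : n = 1 := by omega
    subst h1
    rw [halvingLoop]
    have : PySem.Int.bitCount 1 = 1 := by decide
    rw [this]; push_cast; ring

-- ===== VERDICT (by name: the statement is the Claim_ definition above) =====
theorem halving_sum_spec : Claim_equal_halving_sum := by
  intro n _ hpre
  unfold Spec_halving_sum halving_sum halving_sum_alt
  rw [halvingLoop_closed n n hpre]
  omega
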